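-- pv_equiv track=rewrite | github.com/ohmrr/leetcode-solutions | hashtable/3541_find_most_frequent_vowel_and_consonant.py | maxFreqSum
-- ===== SOURCE A (Python) =====
-- def maxFreqSum(s: str) -> int:
--     vowels = {'a', 'e', 'i', 'o', 'u'}
--     freq = {}
--     max_vowel, max_consonant = 0, 0
--
--     for c in s:
--         freq[c] = 1 + freq.get(c, 0)
--
--         if c in vowels:
--             max_vowel = max(max_vowel, freq[c])
--         else:
--             max_consonant = max(max_consonant, freq[c])
--
--     return max_consonant + max_vowel
-- ===== SOURCE B (Python) =====
-- def maxFreqSum(s: str) -> int: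
--     vowels = {'a', 'e', 'i', 'o', 'u'}
--     freq = {}
--     for c in s:
--         freq[c] = freq.get(c, 0) + 1
--     max_vowel = max((n for ch, n in freq.items() if ch in vowels), default=0)
--     max_consonant = max((n for ch, n in freq.items() if ch not in vowels), default=0)
--     return max_vowel + max_consonant
-- ===== Notes on version B (the rewrite author's own statement) =====
-- stated objective: alternative
-- what changed: A interleaves running max_vowel/max_consonant updates inside the counting loop; B first builds the full frequency table in one pass and then computes each category maximum in a separate reduction over the table with default 0. (fewer per-character operations: no membership test or max update inside the counting loop)
import Mathlib
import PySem

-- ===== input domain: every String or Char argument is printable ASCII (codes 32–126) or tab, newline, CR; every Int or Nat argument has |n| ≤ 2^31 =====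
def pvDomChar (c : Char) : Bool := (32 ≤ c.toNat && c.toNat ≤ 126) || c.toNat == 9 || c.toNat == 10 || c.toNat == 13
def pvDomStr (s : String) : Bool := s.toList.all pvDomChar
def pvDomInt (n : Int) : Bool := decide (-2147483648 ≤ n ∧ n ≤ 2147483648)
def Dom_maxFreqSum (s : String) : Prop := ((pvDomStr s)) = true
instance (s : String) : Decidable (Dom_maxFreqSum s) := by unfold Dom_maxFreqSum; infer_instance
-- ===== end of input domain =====

-- B replaces A's single loop with interleaved running maxima by a frequency-table build
-- followed by two separate max-reductions over the table (objective: alternative decomposition).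

def pvVowels : PySem.Set Char := PySem.Set.ofList ['a', 'e', 'i', 'o', 'u']

-- ===== PORT A =====
-- loop body of A's single pass (freq dict, running max_vowel, running max_consonant)
def pvStepA (st : PySem.Dict Char Int × Int × Int) (c : Char) : PySem.Dict Char Int × Int × Int :=
  let freq := st.1.insert c (1 + st.1.getD c 0)
  -- Python reads freq[c] right after the assignment: the key is present, so getD is exact
  if c ∈ pvVowels then (freq, max st.2.1 (freq.getD c 0), st.2.2)
  else (freq, st.2.1, max st.2.2 (freq.getD c 0))

def maxFreqSum (s : String) : Int :=
  let r := s.toList.foldl pvStepA (PySem.Dict.empty, 0, 0)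
  r.2.2 + r.2.1

-- ===== PORT B =====
def maxFreqSum_alt (s : String) : Int :=
  let freq := s.toList.foldl
    (fun (d : PySem.Dict Char Int) c => d.insert c (d.getD c 0 + 1)) PySem.Dict.empty
  let maxVowel := PySem.List.maxD
    ((freq.items.filter (fun p => decide (p.1 ∈ pvVowels))).map (fun p => p.2)) (fun n => n) 0
  let maxConsonant := PySem.List.maxD
    ((freq.items.filter (fun p => decide (p.1 ∉ pvVowels))).map (fun p => p.2)) (fun n => n) 0
  maxVowel + maxConsonant

-- ===== PRECONDITION & SPEC =====
def Spec_maxFreqSum (s : String) (out : Int) : Prop := out = maxFreqSum_alt s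
instance (s : String) (out : Int) : Decidable (Spec_maxFreqSum s out) := by unfold Spec_maxFreqSum; infer_instance

-- ===== CLAIM (what is proved, stated in full; the proofs are below) =====
def Claim_equal_maxFreqSum : Prop := ∀ (s : String), Dom_maxFreqSum s → Spec_maxFreqSum s (maxFreqSum s)

-- ===== LEMMAS AND PROOFS =====

-- keys of the frequency table that satisfy p, and the max of their counts (0 if none)
def pvKeys (p : Char → Bool) (l : List Char) : List Char := (PySem.Set.ofList l).filter p

def pvMax (p : Char → Bool) (l : List Char) : Int :=
  ((pvKeys p l).map (fun k => ((l.count k : Int)))).foldl max 0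

theorem pv_foldl_max_init (l : List Int) (a x : Int) :
    l.foldl max (max a x) = max (l.foldl max a) x := by
  induction l generalizing a with
  | nil => rfl
  | cons y t ih =>
    simp only [List.foldl]
    rw [show max (max a x) y = max (max a y) x by rw [max_right_comm], ih]

theorem pv_bump_foldl_max (S : List Char) (g : Char → Int) (c : Char) (n : Int)
    (hc : c ∈ S) (hg : g c = n) (a : Int) :
    (S.map (fun k => if k = c then n + 1 else g k)).foldl max a
      = max ((S.map g).foldl max a) (n + 1) := by
  induction S generalizing a with
  | nil => cases hc
  | cons y t ih =>
    simp only [List.map, List.foldl]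
    by_cases hyc : y = c
    · rw [if_pos hyc, hyc, hg]
      by_cases hct : c ∈ t
      · rw [ih hct, pv_foldl_max_init, pv_foldl_max_init, max_assoc, max_assoc, max_self,
          max_eq_right (le_of_lt (lt_add_one n))]
      · have hm : t.map (fun x => if x = c then n + 1 else g x) = t.map g := by
          apply List.map_congr_left
          intro x hx
          apply if_neg
          intro h
          subst h
          exact hct hx
        rw [hm, pv_foldl_max_init, pv_foldl_max_init, max_assoc,
          max_eq_right (le_of_lt (lt_add_one n))]
    · have hct : c ∈ t := (List.mem_cons.mp hc).resolve_left (fun h => hyc h.symm)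
      rw [if_neg hyc, ih hct]

theorem pv_maxD_id_nonneg (xs : List Int) (h : ∀ x ∈ xs, 0 ≤ x) :
    PySem.List.maxD xs (fun n => n) 0 = xs.foldl max 0 := by
  cases xs with
  | nil => rfl
  | cons x t =>
    show (PySem.List.max? (x :: t) (fun n => n)).getD 0 = _
    rw [PySem.List.max?_id_cons]
    simp only [Option.getD, List.foldl]
    rw [max_eq_right (h x (by simp))]

theorem pv_count_append_singleton (l : List Char) (c k : Char) :
    ((l ++ [c]).count k : Int) = (l.count k : Int) + (if k = c then 1 else 0) := by
  rw [List.count_append]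
  by_cases h : k = c
  · subst h; simp
  · simp [h, Ne.symm h]

theorem pvMax_append (p : Char → Bool) (l : List Char) (c : Char) :
    pvMax p (l ++ [c]) = if p c then max (pvMax p l) ((l.count c : Int) + 1) else pvMax p l := by
  unfold pvMax pvKeys
  rw [PySem.Set.ofList_append_singleton]
  by_cases hcl : c ∈ l
  · have hset : (PySem.Set.ofList l).add c = PySem.Set.ofList l := by
      simp [PySem.Set.add, PySem.Set.mem_ofList, hcl]
    rw [hset]
    by_cases hpc : p c = true
    · -- c already present and satisfies p: its count is bumped from n to n+1
      have hmem : c ∈ (PySem.Set.ofList l).filter p := by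
        rw [List.mem_filter]
        exact ⟨(PySem.Set.mem_ofList l c).mpr hcl, hpc⟩
      have hmap : ((PySem.Set.ofList l).filter p).map (fun k => (((l ++ [c]).count k : Int)))
          = ((PySem.Set.ofList l).filter p).map
              (fun k => if k = c then (l.count c : Int) + 1 else (l.count k : Int)) := by
        apply List.map_congr_left
        intro k _
        rw [pv_count_append_singleton]
        by_cases hk : k = c
        · subst hk; simp
        · simp [hk]
      rw [hmap, pv_bump_foldl_max _ _ c ((l.count c : Int)) hmem rfl, if_pos hpc]
    · -- c does not satisfy p: the filtered keys all differ from c, counts unchanged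
      have hmap : ((PySem.Set.ofList l).filter p).map (fun k => (((l ++ [c]).count k : Int)))
          = ((PySem.Set.ofList l).filter p).map (fun k => ((l.count k : Int))) := by
        apply List.map_congr_left
        intro k hk
        rw [List.mem_filter] at hk
        have : k ≠ c := fun h => hpc (h ▸ hk.2)
        rw [pv_count_append_singleton, if_neg this, add_zero]
      rw [hmap, if_neg hpc]
  · have hset : (PySem.Set.ofList l).add c = PySem.Set.ofList l ++ [c] := by
      simp [PySem.Set.add, PySem.Set.mem_ofList, hcl]
    rw [hset, List.filter_append]
    have hcnt0 : l.count c = 0 := List.count_eq_zero.mpr hcl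
    have hmap : ((PySem.Set.ofList l).filter p).map (fun k => (((l ++ [c]).count k : Int)))
        = ((PySem.Set.ofList l).filter p).map (fun k => ((l.count k : Int))) := by
      apply List.map_congr_left
      intro k hk
      rw [List.mem_filter] at hk
      have : k ≠ c := fun h => hcl (h ▸ (PySem.Set.mem_ofList l k).mp hk.1)
      rw [pv_count_append_singleton, if_neg this, add_zero]
    by_cases hpc : p c = true
    · have : List.filter p [c] = [c] := by simp [hpc]
      rw [this, List.map_append, List.foldl_append, hmap, if_pos hpc]
      simp only [List.map, List.foldl]
      rw [pv_count_append_singleton, if_pos rfl, hcnt0]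
    · have : List.filter p [c] = [] := by simp [hpc]
      rw [this, List.append_nil, hmap, if_neg hpc]

def pvV : Char → Bool := fun k => decide (k ∈ pvVowels)
def pvC : Char → Bool := fun k => decide (k ∉ pvVowels)

-- A's loop maintains exactly (frequency table, max vowel count so far, max consonant count so far)
theorem pv_A_loop (l : List Char) :
    l.foldl pvStepA (PySem.Dict.empty, 0, 0)
      = (PySem.Dict.counter l, pvMax pvV l, pvMax pvC l) := by
  induction l using List.reverseRecOn with
  | nil => rfl
  | append_singleton l c ih =>
    rw [List.foldl_append, ih]
    simp only [List.foldl, pvStepA]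
    have hdict : (PySem.Dict.counter l).insert c (1 + (PySem.Dict.counter l).getD c 0)
        = PySem.Dict.counter (l ++ [c]) := by
      rw [PySem.Dict.counter_append_singleton]
      show _ = (PySem.Dict.counter l).insert c ((PySem.Dict.counter l).getD c 0 + 1)
      rw [Int.add_comm]
    have hval : ((PySem.Dict.counter l).insert c (1 + (PySem.Dict.counter l).getD c 0)).getD c 0
        = 1 + (l.count c : Int) := by
      rw [PySem.Dict.getD_insert_self, PySem.Dict.getD_counter]
    by_cases hv : c ∈ pvVowels
    · rw [if_pos hv, hval, hdict]
      have h1 : pvMax pvV (l ++ [c]) = max (pvMax pvV l) ((l.count c : Int) + 1) := by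
        rw [pvMax_append, if_pos (by simp [pvV, hv])]
      have h2 : pvMax pvC (l ++ [c]) = pvMax pvC l := by
        rw [pvMax_append, if_neg (by simp [pvC, hv])]
      rw [h1, h2, Int.add_comm 1]
    · rw [if_neg hv, hval, hdict]
      have h1 : pvMax pvV (l ++ [c]) = pvMax pvV l := by
        rw [pvMax_append, if_neg (by simp [pvV, hv])]
      have h2 : pvMax pvC (l ++ [c]) = max (pvMax pvC l) ((l.count c : Int) + 1) := by
        rw [pvMax_append, if_pos (by simp [pvC, hv])]
      rw [h1, h2, Int.add_comm 1]

-- B builds the counter, then takes the two filtered maxima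
theorem pv_B_char (s : String) :
    maxFreqSum_alt s = pvMax pvV s.toList + pvMax pvC s.toList := by
  unfold maxFreqSum_alt
  simp only [PySem.Dict.foldl_insert_getD_add_one_eq_counter, PySem.Dict.items_counter,
    List.filter_map, List.map_map]
  have hred : ∀ (p : Char → Bool),
      PySem.List.maxD ((List.filter ((fun q : Char × Int => p q.1) ∘
          (fun k => (k, (s.toList.count k : Int)))) (PySem.Set.ofList s.toList)).map
          ((fun q : Char × Int => q.2) ∘ (fun k => (k, (s.toList.count k : Int)))))
          (fun n => n) 0
        = pvMax p s.toList := by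
    intro p
    have hf : (fun q : Char × Int => p q.1) ∘ (fun k => (k, (s.toList.count k : Int))) = p := by
      funext k; rfl
    have hg : ((fun q : Char × Int => q.2) ∘ (fun k => (k, (s.toList.count k : Int))))
        = fun k => (s.toList.count k : Int) := by
      funext k; rfl
    rw [hf, hg, pv_maxD_id_nonneg]
    · rfl
    · intro x hx
      rw [List.mem_map] at hx
      obtain ⟨k, _, hk⟩ := hx
      rw [← hk]
      exact Int.natCast_nonneg _
  exact congrArg₂ (· + ·) (hred pvV) (hred pvC)

-- ===== VERDICT (by name: the statement is the Claim_ definition above) =====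
theorem maxFreqSum_spec : Claim_equal_maxFreqSum := by
  intro s _
  show maxFreqSum s = maxFreqSum_alt s
  rw [pv_B_char]
  unfold maxFreqSum
  rw [pv_A_loop]
  exact Int.add_comm _ _
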